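-- pv_equiv track=rewrite | github.com/marcobarenghi/ProjectEuler | ex78.py | pentagonal
-- ===== SOURCE A (Python) =====
-- def pentagonal(N):
--     a=1
--     b=2
--     delta=4
--     sgn=1
--     while(a<=N):
--         yield sgn, a
--         a+=delta
--         if(b<=N):
--             yield sgn, b
--             b+=delta+1
--         delta+=3
--         sgn=-sgn
-- ===== SOURCE B (Python) =====
-- def _isqrt(n):
--     if n < 2:
--         return n
--     x = n
--     y = (x + n // x) // 2
--     while y < x:
--         x = y
--         y = (x + n // x) // 2
--     return x
--
-- def pentagonal(N):
--     if N < 1: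
--         return
--     kmax = (1 + _isqrt(1 + 24 * N)) // 6
--     for k in range(1, kmax + 1):
--         sgn = 1 if k % 2 == 1 else -1
--         yield sgn, k * (3 * k - 1) // 2
--         p2 = k * (3 * k + 1) // 2
--         if p2 <= N:
--             yield sgn, p2
-- ===== Notes on version B (the rewrite author's own statement) =====
-- stated objective: alternative
-- what changed: B first computes the count of pentagonal indices in closed form via a hand-written Newton integer square root (kmax = (1+isqrt(1+24N))//6) and then generates the terms by closed formulas over a fixed range(1, kmax+1), instead of A's unbounded while loop that maintains four accumulators (a, b, delta, sgn) and tests the running value against N to terminate.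
import Mathlib
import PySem

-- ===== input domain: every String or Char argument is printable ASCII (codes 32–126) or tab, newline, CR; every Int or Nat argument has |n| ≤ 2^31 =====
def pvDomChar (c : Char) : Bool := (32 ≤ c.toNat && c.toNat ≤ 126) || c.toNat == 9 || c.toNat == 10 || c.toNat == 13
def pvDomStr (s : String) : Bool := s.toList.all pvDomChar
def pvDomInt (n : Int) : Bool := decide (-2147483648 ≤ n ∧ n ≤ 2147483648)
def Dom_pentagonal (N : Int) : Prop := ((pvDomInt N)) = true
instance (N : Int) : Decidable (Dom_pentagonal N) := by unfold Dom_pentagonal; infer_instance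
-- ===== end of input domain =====

-- B replaces A's unbounded while loop with four mutable accumulators by a closed-form
-- term count (Newton integer square root) followed by formula evaluation over a fixed
-- range; objective: alternative. (Both Pythons are generators; the ports return the
-- list of yields.)

-- ===== PORT A =====
-- Literal port of A's while loop; the proof argument hd (0 < delta, an invariant of A's
-- loop) only justifies termination and does not change the computation.
def pentagonalAux (N a b delta sgn : Int) (hd : 0 < delta) : List (Int × Int) :=
  if _h : a ≤ N then
    (sgn, a) ::
      (if b ≤ N then
        (sgn, b) :: pentagonalAux N (a + delta) (b + (delta + 1)) (delta + 3) (-sgn) (by omega)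
      else
        pentagonalAux N (a + delta) b (delta + 3) (-sgn) (by omega))
  else []
termination_by (N + 1 - a).toNat
decreasing_by all_goals omega

def pentagonal (N : Int) : List (Int × Int) :=
  pentagonalAux N 1 2 4 1 (by norm_num)

-- ===== PORT B =====
-- termination/welldefinedness helper cited by the isqrt port: one Newton step from a
-- positive x keeps the iterate positive and keeps the invariant n < (y+1)^2
theorem newton_step (n x : Int) (hn : 2 ≤ n) (hx : 1 ≤ x) :
    1 ≤ PySem.Int.floordiv (x + PySem.Int.floordiv n x) 2 ∧
      n < (PySem.Int.floordiv (x + PySem.Int.floordiv n x) 2 + 1) *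
          (PySem.Int.floordiv (x + PySem.Int.floordiv n x) 2 + 1) := by
  rw [PySem.Int.floordiv_eq_ediv_of_pos (by omega : (0:Int) < x),
      PySem.Int.floordiv_eq_ediv_of_pos (by norm_num : (0:Int) < 2)]
  set q := n / x with hq
  have hq0 : 0 ≤ q := Int.ediv_nonneg (by omega) (by omega)
  have hqx : q * x ≤ n := Int.ediv_mul_le n (by omega)
  have hlt : n < (q + 1) * x := by
    have := Int.lt_ediv_add_one_mul_self n (by omega : (0:Int) < x)
    simpa [hq] using this
  set y := (x + q) / 2 with hy
  have h2y : 2 * y ≤ x + q ∧ x + q < 2 * (y + 1) := by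
    constructor
    · exact Int.ediv_add_emod (x + q) 2 ▸ by
        have := Int.emod_nonneg (x + q) (by norm_num : (2:Int) ≠ 0)
        omega
    · have := Int.emod_lt_of_pos (x + q) (by norm_num : (0:Int) < 2)
      have := Int.ediv_add_emod (x + q) 2
      omega
  have hy0 : 0 ≤ y := by omega
  constructor
  · -- y ≥ 1: otherwise (y+1)^2 ≤ 1 < n, contradicting the invariant below; direct:
    nlinarith [sq_nonneg (x - q - 1), h2y.1, h2y.2]
  · nlinarith [sq_nonneg (x - q - 1), h2y.1, h2y.2]

-- faithful port of the hand-written Newton loop in Source B's _isqrt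
def isqrtNewtonAux (n x : Int) (hn : 2 ≤ n) (hx : 1 ≤ x) : Int :=
  if _h : PySem.Int.floordiv (x + PySem.Int.floordiv n x) 2 < x then
    isqrtNewtonAux n (PySem.Int.floordiv (x + PySem.Int.floordiv n x) 2) hn
      (newton_step n x hn hx).1
  else x
termination_by x.toNat
decreasing_by
  have := (newton_step n x hn hx).1
  omega

def pyIsqrt (n : Int) : Int :=
  if h : n < 2 then n
  else isqrtNewtonAux n n (by omega) (by omega)

def pentagonal_alt (N : Int) : List (Int × Int) :=
  if N < 1 then []
  else
    let kmax := PySem.Int.floordiv (1 + pyIsqrt (1 + 24 * N)) 6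
    (PySem.List.pyRange 1 (kmax + 1) 1).flatMap (fun k =>
      let sgn : Int := if PySem.Int.mod k 2 = 1 then 1 else -1
      let p2 := PySem.Int.floordiv (k * (3 * k + 1)) 2
      (sgn, PySem.Int.floordiv (k * (3 * k - 1)) 2) ::
        (if p2 ≤ N then [(sgn, p2)] else []))

-- ===== PRECONDITION & SPEC =====
def Spec_pentagonal (N : Int) (out : List (Int × Int)) : Prop := out = pentagonal_alt N
instance (N : Int) (out : List (Int × Int)) : Decidable (Spec_pentagonal N out) := by unfold Spec_pentagonal; infer_instance

-- ===== CLAIM (what is proved, stated in full; the proofs are below) =====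
def Claim_equal_pentagonal : Prop := ∀ (N : Int), Dom_pentagonal N → Spec_pentagonal N (pentagonal N)

-- ===== LEMMAS AND PROOFS =====

-- exact values of the halved products (they are always even)
theorem pent_two_mul_p1 (k : Int) : 2 * PySem.Int.floordiv (k * (3 * k - 1)) 2 = k * (3 * k - 1) := by
  rw [PySem.Int.floordiv_eq_ediv_of_pos (by norm_num)]
  have h2 : (2:Int) ∣ k * (3 * k - 1) := by
    rcases Int.even_or_odd k with ⟨m, hm⟩ | ⟨m, hm⟩
    · exact ⟨m * (3 * k - 1), by rw [hm]; ring⟩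
    · exact ⟨k * (3 * m + 1), by rw [hm]; ring⟩
  exact Int.mul_ediv_cancel' h2

theorem pent_two_mul_p2 (k : Int) : 2 * PySem.Int.floordiv (k * (3 * k + 1)) 2 = k * (3 * k + 1) := by
  rw [PySem.Int.floordiv_eq_ediv_of_pos (by norm_num)]
  have h2 : (2:Int) ∣ k * (3 * k + 1) := by
    rcases Int.even_or_odd k with ⟨m, hm⟩ | ⟨m, hm⟩
    · exact ⟨m * (3 * k + 1), by rw [hm]; ring⟩
    · exact ⟨k * (3 * m + 2), by rw [hm]; ring⟩
  exact Int.mul_ediv_cancel' h2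

-- p1 ≥ k for k ≥ 1 (used for termination of the proof-side k-recursion)
theorem pent_p1_ge (k : Int) (hk : 1 ≤ k) : k ≤ PySem.Int.floordiv (k * (3 * k - 1)) 2 := by
  have h := pent_two_mul_p1 k
  nlinarith [sq_nonneg (k - 1)]

-- proof-side helper: the same yields indexed directly by k (recursion cut off by p1 > N)
def pentK (N k : Int) (hk : 1 ≤ k) : List (Int × Int) :=
  let p1 := PySem.Int.floordiv (k * (3 * k - 1)) 2
  if _h : p1 ≤ N then
    let sgn : Int := if PySem.Int.mod k 2 = 1 then 1 else -1
    let p2 := PySem.Int.floordiv (k * (3 * k + 1)) 2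
    ((sgn, p1) :: (if p2 ≤ N then [(sgn, p2)] else [])) ++ pentK N (k + 1) (by omega)
  else []
termination_by (N + 1 - k).toNat
decreasing_by
  have := pent_p1_ge k hk
  omega

-- congruence for pentagonalAux (the termination proof argument is irrelevant)
theorem pentagonalAux_congr (N a a' b b' d d' s s' : Int) (hd : 0 < d) (hd' : 0 < d')
    (ha : a = a') (hb : b = b') (hdd : d = d') (hs : s = s') :
    pentagonalAux N a b d s hd = pentagonalAux N a' b' d' s' hd' := by
  subst ha; subst hb; subst hdd; subst hs; rfl

-- PySem.Int.mod agrees with emod for positive modulus (used to push parity to omega)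
theorem pent_sgn_succ (k : Int) :
    (-(if PySem.Int.mod k 2 = 1 then (1:Int) else -1)) =
      if PySem.Int.mod (k + 1) 2 = 1 then (1:Int) else -1 := by
  rw [PySem.Int.mod_eq_emod_of_pos (by norm_num), PySem.Int.mod_eq_emod_of_pos (by norm_num)]
  split_ifs with h1 h2 h2 <;> omega

-- loop invariant: with a = p1(k), delta = 3k+1, sgn = parity sign, and b either exactly
-- p2(k) or a stale value > N still bounded by p2(k), A's loop produces pentK's tail from k.
theorem pent_aux_eq (N k b : Int) (hk : 1 ≤ k) (hd : 0 < 3 * k + 1)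
    (hb : b = PySem.Int.floordiv (k * (3 * k + 1)) 2 ∨
          (N < b ∧ b ≤ PySem.Int.floordiv (k * (3 * k + 1)) 2)) :
    pentagonalAux N (PySem.Int.floordiv (k * (3 * k - 1)) 2) b (3 * k + 1)
        (if PySem.Int.mod k 2 = 1 then 1 else -1) hd
      = pentK N k hk := by
  have hp1 := pent_two_mul_p1 k
  have hp2 := pent_two_mul_p2 k
  have hp1' := pent_two_mul_p1 (k + 1)
  have hp2' := pent_two_mul_p2 (k + 1)
  have e1 : PySem.Int.floordiv ((k+1) * (3 * (k+1) - 1)) 2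
      = PySem.Int.floordiv (k * (3 * k - 1)) 2 + (3 * k + 1) := by nlinarith [hp1, hp1']
  have e2 : PySem.Int.floordiv ((k+1) * (3 * (k+1) + 1)) 2
      = PySem.Int.floordiv (k * (3 * k + 1)) 2 + ((3 * k + 1) + 1) := by nlinarith [hp2, hp2']
  rw [pentagonalAux, pentK]
  by_cases hA : PySem.Int.floordiv (k * (3 * k - 1)) 2 ≤ N
  · simp only [hA, dif_pos, List.cons_append]
    by_cases hB : b ≤ N
    · -- b was not stale, so b = p2(k) and it is yielded on both sides
      have hbeq : b = PySem.Int.floordiv (k * (3 * k + 1)) 2 := by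
        rcases hb with h | ⟨h1, _⟩
        · exact h
        · omega
      subst hbeq
      simp only [hB, if_pos, List.cons_append, List.nil_append]
      rw [pent_sgn_succ k]
      refine congrArg _ (congrArg _ ?_)
      exact (pentagonalAux_congr N _ _ _ _ _ _ _ _ (by omega) (by omega)
        (by omega) (by omega) (by ring) rfl).trans
        (pent_aux_eq N (k + 1) _ (by omega) (by omega) (Or.inl rfl))
    · -- b is (or becomes) stale: not yielded on either side
      have hp2N : ¬ PySem.Int.floordiv (k * (3 * k + 1)) 2 ≤ N := by
        rcases hb with h | ⟨h1, h2⟩ <;> omega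
      simp only [hB, hp2N, if_neg, not_false_iff, List.nil_append]
      rw [pent_sgn_succ k]
      refine congrArg _ ?_
      exact (pentagonalAux_congr N _ _ _ _ _ _ _ _ (by omega) (by omega)
        (by omega) rfl (by ring) rfl).trans
        (pent_aux_eq N (k + 1) b (by omega) (by omega) (Or.inr ⟨by omega, by omega⟩))
  · simp only [hA, dif_neg, not_false_iff]
termination_by (N + 1 - k).toNat
decreasing_by
  all_goals
    have := pent_p1_ge k hk
    omega

-- Newton loop correctness: the result s satisfies 1 ≤ s, s^2 ≤ n, n < (s+1)^2
theorem isqrtNewtonAux_correct (n : Int) (hn : 2 ≤ n) :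
    ∀ (m : Nat) (x : Int) (hx : 1 ≤ x), x.toNat = m → n < (x + 1) * (x + 1) →
      1 ≤ isqrtNewtonAux n x hn hx ∧
      isqrtNewtonAux n x hn hx * isqrtNewtonAux n x hn hx ≤ n ∧
      n < (isqrtNewtonAux n x hn hx + 1) * (isqrtNewtonAux n x hn hx + 1) := by
  intro m
  induction m using Nat.strong_induction_on with
  | _ m ih =>
    intro x hx hm hinv
    rw [isqrtNewtonAux]
    by_cases h : PySem.Int.floordiv (x + PySem.Int.floordiv n x) 2 < x
    · simp only [h, dif_pos]
      have hstep := newton_step n x hn hx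
      exact ih (PySem.Int.floordiv (x + PySem.Int.floordiv n x) 2).toNat (by omega)
        _ (by omega) rfl hstep.2
    · simp only [h, dif_neg, not_false_iff]
      refine ⟨hx, ?_, hinv⟩
      -- at exit x ≤ (x + n//x)//2, hence x ≤ n//x, hence x*x ≤ n
      have hfd : PySem.Int.floordiv n x = n / x := PySem.Int.floordiv_eq_ediv_of_pos (by omega)
      have heq : PySem.Int.floordiv (x + PySem.Int.floordiv n x) 2 = (x + n / x) / 2 := by
        rw [PySem.Int.floordiv_eq_ediv_of_pos (by norm_num : (0:Int) < 2), hfd]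
      have hemod := Int.emod_nonneg (x + n / x) (by norm_num : (2:Int) ≠ 0)
      have hdm := Int.ediv_add_emod (x + n / x) 2
      have hxq : x ≤ n / x := by omega
      have hqx : (n / x) * x ≤ n := Int.ediv_mul_le n (by omega)
      nlinarith [hxq, hqx]

theorem pyIsqrt_correct (n : Int) (hn : 2 ≤ n) :
    1 ≤ pyIsqrt n ∧ pyIsqrt n * pyIsqrt n ≤ n ∧ n < (pyIsqrt n + 1) * (pyIsqrt n + 1) := by
  rw [pyIsqrt]
  simp only [show ¬ n < 2 by omega, dif_neg, not_false_iff]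
  exact isqrtNewtonAux_correct n hn n.toNat n (by omega) rfl (by nlinarith)

-- the closed-form bound: kmax = (1 + isqrt(1+24N))//6 is exactly the last k with p1(k) ≤ N
theorem kmax_bounds (N : Int) (hN : 1 ≤ N) :
    1 ≤ PySem.Int.floordiv (1 + pyIsqrt (1 + 24 * N)) 6 ∧
    PySem.Int.floordiv ((PySem.Int.floordiv (1 + pyIsqrt (1 + 24 * N)) 6) * (3 * (PySem.Int.floordiv (1 + pyIsqrt (1 + 24 * N)) 6) - 1)) 2 ≤ N ∧
    N < PySem.Int.floordiv ((PySem.Int.floordiv (1 + pyIsqrt (1 + 24 * N)) 6 + 1) * (3 * (PySem.Int.floordiv (1 + pyIsqrt (1 + 24 * N)) 6 + 1) - 1)) 2 := by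
  have hs := pyIsqrt_correct (1 + 24 * N) (by omega)
  set s := pyIsqrt (1 + 24 * N) with hsdef
  obtain ⟨hs1, hs2, hs3⟩ := hs
  set km := PySem.Int.floordiv (1 + s) 6 with hkm
  have h6 : km * 6 ≤ 1 + s ∧ 1 + s < (km + 1) * 6 := by
    rw [hkm, PySem.Int.floordiv_eq_ediv_of_pos (by norm_num : (0:Int) < 6)]
    have := Int.ediv_mul_le (1 + s) (by norm_num : (6:Int) ≠ 0)
    have := Int.lt_ediv_add_one_mul_self (1 + s) (by norm_num : (0:Int) < 6)
    omega
  have hs5 : 5 ≤ s := by nlinarith [hs3]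
  have hkm1 : 1 ≤ km := by omega
  have h1 := pent_two_mul_p1 km
  have h2 := pent_two_mul_p1 (km + 1)
  refine ⟨hkm1, ?_, ?_⟩
  · -- (6km - 1)^2 ≤ s^2 ≤ 1 + 24N gives p1(km) ≤ N
    nlinarith [h6.1, hs2, hs1, h1, sq_nonneg (6 * km - 1 - s)]
  · -- (6km + 5)^2 ≥ (s+1)^2 > 1 + 24N gives p1(km+1) > N
    nlinarith [h6.2, hs3, hs1, h2, sq_nonneg (6 * km + 5 - (s + 1))]

-- p1 is monotone on k ≥ 1
theorem pent_p1_mono (j m : Int) (hj : 1 ≤ j) (hjm : j ≤ m) :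
    PySem.Int.floordiv (j * (3 * j - 1)) 2 ≤ PySem.Int.floordiv (m * (3 * m - 1)) 2 := by
  have h1 := pent_two_mul_p1 j
  have h2 := pent_two_mul_p1 m
  nlinarith [mul_nonneg (by omega : (0:Int) ≤ m - j) (by omega : (0:Int) ≤ 3 * (m + j) - 1)]

-- pentK from k equals the flatMap over the remaining range [k, kmax+1)
theorem pentK_eq_flatMap (N km : Int) (hkm1 : 1 ≤ km)
    (hup : N < PySem.Int.floordiv ((km + 1) * (3 * (km + 1) - 1)) 2)
    (hlo : PySem.Int.floordiv (km * (3 * km - 1)) 2 ≤ N) :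
    ∀ (k : Int) (hk : 1 ≤ k), k ≤ km + 1 →
      pentK N k hk = (PySem.List.pyRange k (km + 1) 1).flatMap (fun k =>
        let sgn : Int := if PySem.Int.mod k 2 = 1 then 1 else -1
        let p2 := PySem.Int.floordiv (k * (3 * k + 1)) 2
        (sgn, PySem.Int.floordiv (k * (3 * k - 1)) 2) ::
          (if p2 ≤ N then [(sgn, p2)] else [])) := by
  intro k
  induction hm : (km + 1 - k).toNat using Nat.strong_induction_on generalizing k with
  | _ m ih =>
    intro hk hkle
    by_cases hend : k = km + 1
    · subst hend
      rw [PySem.List.pyRange_one_eq_nil (by omega), pentK]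
      simp only [show ¬ PySem.Int.floordiv ((km+1) * (3 * (km+1) - 1)) 2 ≤ N by omega,
        dif_neg, not_false_iff, List.flatMap_nil]
    · have hklt : k ≤ km := by omega
      have hp1k : PySem.Int.floordiv (k * (3 * k - 1)) 2 ≤ N :=
        le_trans (pent_p1_mono k km hk hklt) hlo
      rw [PySem.List.pyRange_one_cons (by omega), pentK]
      simp only [hp1k, dif_pos, List.flatMap_cons]
      rw [ih (km + 1 - (k + 1)).toNat (by omega) (k + 1) rfl (by omega) (by omega)]

-- ===== VERDICT (by name: the statement is the Claim_ definition above) =====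
theorem pentagonal_spec : Claim_equal_pentagonal := by
  intro N _
  unfold Spec_pentagonal pentagonal pentagonal_alt
  by_cases hN : N < 1
  · rw [pentagonalAux, dif_neg (by omega : ¬ (1:Int) ≤ N), if_pos hN]
  · have hN1 : 1 ≤ N := by omega
    obtain ⟨hkm1, hlo, hup⟩ := kmax_bounds N hN1
    simp only [if_neg hN]
    have hA : pentagonalAux N 1 2 4 1 (by norm_num) = pentK N 1 (by norm_num) := by
      refine Eq.trans ?_ (pent_aux_eq N 1 2 (by norm_num) (by norm_num) (Or.inl (by decide)))
      exact pentagonalAux_congr N _ _ _ _ _ _ _ _ (by norm_num) (by norm_num)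
        (by decide) rfl (by decide) (by decide)
    rw [hA]
    exact pentK_eq_flatMap N _ hkm1 hup hlo 1 (by norm_num) (by omega)
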